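-- pv_equiv track=rewrite | github.com/arnab44/PySpark-Boilerplate | src/jobs/demography/model/classes/bert_ner.py | merge_bert_token_fragments
-- ===== SOURCE A (Python) =====
-- def merge_bert_token_fragments(tokens, label_indices, mapper):
--     # Bert breaks unseen words into multiple fragments with ## prefix
--     new_tokens, new_labels = [], []
--     # merge tokens.
--     for token, label_idx in zip(tokens, label_indices[0]):
--         # clean unknown tokens
--         if token.startswith("##"):
--             new_tokens[-1] = new_tokens[-1] + token[2:]
--         else:
--             new_labels.append(mapper[label_idx])
--             new_tokens.append(token)
--     return new_labels, new_tokens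
-- ===== SOURCE B (Python) =====
-- def merge_bert_token_fragments(tokens, label_indices, mapper):
--     # Word-at-a-time scan: each outer step consumes one word start plus the whole
--     # run of following '##' fragments (inner scan), joining the pieces at once.
--     pairs = list(zip(tokens, label_indices[0]))
--     new_labels, new_tokens = [], []
--     i, n = 0, len(pairs)
--     while i < n:
--         tok, lab = pairs[i]
--         j = i + 1
--         while j < n and pairs[j][0].startswith("##"):
--             j += 1
--         new_labels.append(mapper[lab])
--         new_tokens.append(tok + "".join(t[2:] for t, _ in pairs[i + 1:j]))
--         i = j
--     return new_labels, new_tokens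
-- ===== Notes on version B (the rewrite author's own statement) =====
-- stated objective: alternative
-- what changed: B replaces A's single left-to-right pass that mutates the last output element per '##' fragment with a word-at-a-time scan: an inner loop consumes each run of '##' fragments and the word is joined once per group, so no output element is ever rewritten.
import Mathlib
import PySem

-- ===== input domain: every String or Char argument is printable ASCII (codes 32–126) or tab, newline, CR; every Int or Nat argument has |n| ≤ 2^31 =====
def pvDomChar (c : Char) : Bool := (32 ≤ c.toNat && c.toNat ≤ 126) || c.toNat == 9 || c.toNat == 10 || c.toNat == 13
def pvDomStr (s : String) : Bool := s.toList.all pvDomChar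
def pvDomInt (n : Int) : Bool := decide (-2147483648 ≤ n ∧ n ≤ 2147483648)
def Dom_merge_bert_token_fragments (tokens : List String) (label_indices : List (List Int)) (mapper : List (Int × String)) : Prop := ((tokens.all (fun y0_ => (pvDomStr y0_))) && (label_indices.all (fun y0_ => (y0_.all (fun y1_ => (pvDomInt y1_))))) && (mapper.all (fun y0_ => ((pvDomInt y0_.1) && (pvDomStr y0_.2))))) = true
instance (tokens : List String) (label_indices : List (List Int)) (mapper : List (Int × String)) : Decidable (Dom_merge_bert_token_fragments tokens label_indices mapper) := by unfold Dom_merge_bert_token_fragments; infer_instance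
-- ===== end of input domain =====

-- B replaces A's pass that rewrites the last output element per '##' fragment with a
-- word-at-a-time scan joining each fragment run at once (alternative decomposition).
-- Return-value equivalence only; neither version mutates its arguments.

-- ===== PORT A =====
-- loop body of A: state = (new_tokens, new_labels)
def pvStepA (mapper : List (Int × String)) (st : List String × List String) (p : String × Int) : List String × List String :=
  if PySem.Str.startswith p.1 "##" then
    (st.1.dropLast ++ [st.1.getLastD "" ++ PySem.Str.slice p.1 (some 2) none], st.2)
  else
    (st.1 ++ [p.1], st.2 ++ [(PySem.Dict.mk mapper).getD p.2 ""])

def merge_bert_token_fragments (tokens : List String) (label_indices : List (List Int)) (mapper : List (Int × String)) : List String × List String :=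
  let st := (tokens.zip (label_indices.headD [])).foldl (pvStepA mapper) ([], [])
  (st.2, st.1)

-- ===== PORT B =====
-- pairs[j][0].startswith('##'): the inner-loop continuation test
def pvFrag (p : String × Int) : Bool := PySem.Str.startswith p.1 "##"

-- tok + "".join(t[2:] for t, _ in run)
def pvJoinFrags (l : List (String × Int)) : String :=
  PySem.Str.join "" (l.map (fun p => PySem.Str.slice p.1 (some 2) none))

-- the outer while loop: one step per word start, the inner scan consumes the '##' run
def pvWords (mapper : List (Int × String)) : List (String × Int) → List String × List String
  | [] => ([], [])
  | p :: rest =>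
      let run := rest.takeWhile pvFrag
      let rest' := rest.dropWhile pvFrag
      let out := pvWords mapper rest'
      ((PySem.Dict.mk mapper).getD p.2 "" :: out.1, (p.1 ++ pvJoinFrags run) :: out.2)
  termination_by l => l.length
  decreasing_by
    simp only [List.length_cons]
    exact Nat.lt_succ_of_le (List.length_dropWhile_le _ _)

def merge_bert_token_fragments_alt (tokens : List String) (label_indices : List (List Int)) (mapper : List (Int × String)) : List String × List String :=
  pvWords mapper (tokens.zip (label_indices.headD []))

-- ===== PRECONDITION & SPEC =====
-- Pre_ excludes exactly the inputs where the Python A raises: label_indices = [] (IndexError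
-- on label_indices[0]), a first zipped token starting with '##' (IndexError on new_tokens[-1]),
-- and a non-'##' zipped token whose label is not a mapper key (KeyError).
def Pre_merge_bert_token_fragments (tokens : List String) (label_indices : List (List Int)) (mapper : List (Int × String)) : Prop :=
  label_indices ≠ [] ∧
  (∀ p ∈ (tokens.zip (label_indices.headD [])).take 1, PySem.Str.startswith p.1 "##" = false) ∧
  (∀ p ∈ tokens.zip (label_indices.headD []), PySem.Str.startswith p.1 "##" = false → (PySem.Dict.mk mapper).contains p.2 = true)
instance (tokens : List String) (label_indices : List (List Int)) (mapper : List (Int × String)) : Decidable (Pre_merge_bert_token_fragments tokens label_indices mapper) := by unfold Pre_merge_bert_token_fragments; infer_instance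

def pvWitness_merge_bert_token_fragments : List String × List (List Int) × (List (Int × String)) :=
  (["he", "##llo", "x"], [[0, 0, 1]], [(0, "B-PER"), (1, "O")])

def Spec_merge_bert_token_fragments (tokens : List String) (label_indices : List (List Int)) (mapper : List (Int × String)) (out : List String × List String) : Prop := out = merge_bert_token_fragments_alt tokens label_indices mapper
instance (tokens : List String) (label_indices : List (List Int)) (mapper : List (Int × String)) (out : List String × List String) : Decidable (Spec_merge_bert_token_fragments tokens label_indices mapper out) := by unfold Spec_merge_bert_token_fragments; infer_instance

-- ===== CLAIM =====
def Claim_equal_merge_bert_token_fragments : Prop := ∀ (tokens : List String) (label_indices : List (List Int)) (mapper : List (Int × String)), Dom_merge_bert_token_fragments tokens label_indices mapper → Pre_merge_bert_token_fragments tokens label_indices mapper → Spec_merge_bert_token_fragments tokens label_indices mapper (merge_bert_token_fragments tokens label_indices mapper)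

-- ===== LEMMAS AND PROOFS =====

theorem pvJoin_empty_nil : PySem.Str.join "" ([] : List String) = "" := by
  rfl

theorem pvJoin_empty_cons (a : String) (l : List String) :
    PySem.Str.join "" (a :: l) = a ++ PySem.Str.join "" l := by
  cases l with
  | nil => simp [PySem.Str.join, PySem.Chars.join, List.intercalate]
  | cons b l => simp [PySem.Str.join, PySem.Chars.join_cons_cons, String.ofList_append]

theorem pvJoinFrags_cons (p : String × Int) (l : List (String × Int)) :
    pvJoinFrags (p :: l) = PySem.Str.slice p.1 (some 2) none ++ pvJoinFrags l := by
  unfold pvJoinFrags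
  rw [List.map_cons, pvJoin_empty_cons]

-- A's fold from a nonempty token accumulator, characterized by B's word scan
theorem pvMain (mapper : List (Int × String)) (l : List (String × Int)) :
    ∀ (nt nl : List String) (last : String),
    l.foldl (pvStepA mapper) (nt ++ [last], nl)
      = (nt ++ [last ++ pvJoinFrags (l.takeWhile pvFrag)]
            ++ (pvWords mapper (l.dropWhile pvFrag)).2,
         nl ++ (pvWords mapper (l.dropWhile pvFrag)).1) := by
  induction l with
  | nil =>
      intro nt nl last
      simp [pvWords, pvJoinFrags, pvJoin_empty_nil]
  | cons p l ih =>
      intro nt nl last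
      by_cases h : PySem.Str.startswith p.1 "##" = true
      · have hf : pvFrag p = true := h
        simp only [List.foldl_cons, pvStepA, h, if_pos,
          List.dropLast_concat, List.getLastD_concat,
          List.takeWhile_cons, List.dropWhile_cons, hf, pvJoinFrags_cons]
        rw [ih nt nl (last ++ PySem.Str.slice p.1 (some 2) none)]
        simp [String.append_assoc]
      · have h' := Bool.of_not_eq_true h
        have hf : pvFrag p = false := h'
        simp only [List.foldl_cons, pvStepA, h', Bool.false_eq_true, if_false,
          List.takeWhile_cons, List.dropWhile_cons, hf]
        rw [show nt ++ [last] ++ [p.1] = (nt ++ [last]) ++ [p.1] from rfl,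
            ih (nt ++ [last]) (nl ++ [(PySem.Dict.mk mapper).getD p.2 ""]) p.1]
        rw [pvWords]
        simp [pvJoinFrags, pvJoin_empty_nil]

-- ===== VERDICT =====
theorem merge_bert_token_fragments_spec : Claim_equal_merge_bert_token_fragments := by
  intro tokens label_indices mapper _ hpre
  obtain ⟨-, hfirst, -⟩ := hpre
  unfold Spec_merge_bert_token_fragments merge_bert_token_fragments merge_bert_token_fragments_alt
  cases hz : tokens.zip (label_indices.headD []) with
  | nil => simp [pvWords]
  | cons p l =>
      have hp : PySem.Str.startswith p.1 "##" = false := by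
        apply hfirst p; rw [hz]; simp
      rw [List.foldl_cons]
      simp only [pvStepA, hp, Bool.false_eq_true, if_false, List.nil_append]
      rw [show [p.1] = ([] : List String) ++ [p.1] from rfl, pvMain]
      rw [pvWords]
      simp
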